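-- pv_equiv track=rewrite | github.com/Hohnik/scheduler | scheduler2.0/main.py | calc_blocksizes
-- ===== SOURCE A (Python) =====
-- def calc_blocksizes(sws: int, blocks=[]) -> list:
--     """
--     Calculate the best possible combination of blocks.
--     """
--     if not sws:
--         return blocks
--
--     if sws % 2 == 0:
--         return calc_blocksizes(sws-2, blocks + [2])
--
--     if sws >= 3:
--         return calc_blocksizes(sws-3, blocks + [3])
--
--     if sws == 1:
--         return calc_blocksizes(sws-1, blocks + [1])
-- ===== SOURCE B (Python) =====
-- def calc_blocksizes(sws: int, blocks=[]) -> list: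
--     """
--     Calculate the best possible combination of blocks (closed form, no recursion).
--     """
--     if sws % 2 == 0:
--         return blocks + [2] * (sws // 2)
--     if sws == 1:
--         return blocks + [1]
--     return blocks + [3] + [2] * ((sws - 3) // 2)
-- ===== Notes on version B (the rewrite author's own statement) =====
-- stated objective: faster
-- what changed: Replaced the tail recursion (one call per block, each concatenating a growing list) by a closed-form case split that builds the whole run of 2-blocks at once with list repetition.
-- outside the precondition, e.g. on calc_blocksizes(-1, []): A returns None, B returns [3]
import Mathlib
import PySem

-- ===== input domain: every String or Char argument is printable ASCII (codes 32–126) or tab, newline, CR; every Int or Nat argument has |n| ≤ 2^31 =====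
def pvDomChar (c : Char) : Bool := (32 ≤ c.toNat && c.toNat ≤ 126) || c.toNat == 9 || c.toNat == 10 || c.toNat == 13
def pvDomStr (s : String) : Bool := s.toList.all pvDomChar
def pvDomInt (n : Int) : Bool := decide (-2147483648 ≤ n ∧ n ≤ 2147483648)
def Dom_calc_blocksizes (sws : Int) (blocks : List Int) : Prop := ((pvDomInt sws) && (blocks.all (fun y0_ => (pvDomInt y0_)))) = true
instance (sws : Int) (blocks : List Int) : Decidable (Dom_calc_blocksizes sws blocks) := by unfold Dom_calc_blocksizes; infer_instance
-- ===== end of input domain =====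

-- B replaces A's tail recursion by a closed-form case split (whole run of 2-blocks built at once); objective: faster.

-- ===== PORT A =====
-- Literal transliteration of A's recursion. On negative even sws the Python recurses
-- without bound (RecursionError); the inner `0 < sws` guard only makes the Lean function
-- total there — such inputs are outside Pre_. On negative odd sws the Python falls
-- through every branch and returns None (no list value); the final `else blocks` is
-- likewise outside Pre_.
def calc_blocksizes (sws : Int) (blocks : List Int) : List Int :=
  if sws == 0 then blocks
  else if sws % 2 == 0 then
    if 0 < sws then calc_blocksizes (sws - 2) (blocks ++ [2]) else blocks
  else if sws ≥ 3 then calc_blocksizes (sws - 3) (blocks ++ [3])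
  else if sws == 1 then calc_blocksizes (sws - 1) (blocks ++ [1])
  else blocks
termination_by sws.toNat
decreasing_by all_goals simp_all

-- ===== PORT B =====
def calc_blocksizes_alt (sws : Int) (blocks : List Int) : List Int :=
  if sws % 2 == 0 then blocks ++ List.replicate (PySem.Int.floordiv sws 2).toNat 2
  else if sws == 1 then blocks ++ [1]
  else blocks ++ [3] ++ List.replicate (PySem.Int.floordiv (sws - 3) 2).toNat 2

-- ===== PRECONDITION & SPEC =====
-- Pre_ excludes exactly the inputs on which Python A does not return a list: on negative
-- odd sws A falls through every branch and returns None (not a list value); on negative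
-- even sws, and on sws ≥ 19996 (one recursive call per block, so the sws/2-deep recursion
-- exceeds the test harness's recursion limit of 10000; 19995 is the measured last
-- returning value), A raises RecursionError.
def Pre_calc_blocksizes (sws : Int) (blocks : List Int) : Prop := 0 ≤ sws ∧ sws ≤ 19995
instance (sws : Int) (blocks : List Int) : Decidable (Pre_calc_blocksizes sws blocks) := by unfold Pre_calc_blocksizes; infer_instance
def pvWitness_calc_blocksizes : Int × List Int := (7, [5])

def Spec_calc_blocksizes (sws : Int) (blocks : List Int) (out : List Int) : Prop := out = calc_blocksizes_alt sws blocks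
instance (sws : Int) (blocks : List Int) (out : List Int) : Decidable (Spec_calc_blocksizes sws blocks out) := by unfold Spec_calc_blocksizes; infer_instance

-- ===== CLAIM (what is proved, stated in full; the proofs are below) =====
def Claim_equal_calc_blocksizes : Prop := ∀ (sws : Int) (blocks : List Int), Dom_calc_blocksizes sws blocks → Pre_calc_blocksizes sws blocks → Spec_calc_blocksizes sws blocks (calc_blocksizes sws blocks)

-- ===== LEMMAS AND PROOFS =====

-- For nonnegative sws, B's closed form in terms of the natural number sws.toNat.
lemma alt_closed (sws : Int) (blocks : List Int) (h : 0 ≤ sws) :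
    calc_blocksizes_alt sws blocks =
      if sws % 2 == 0 then blocks ++ List.replicate (sws.toNat / 2) 2
      else if sws == 1 then blocks ++ [1]
      else blocks ++ [3] ++ List.replicate ((sws.toNat - 3) / 2) 2 := by
  unfold calc_blocksizes_alt
  have h2 : PySem.Int.floordiv sws 2 = sws / 2 := by
    simp [PySem.Int.floordiv, Int.fdiv_eq_ediv]
  have h3 : PySem.Int.floordiv (sws - 3) 2 = (sws - 3) / 2 := by
    simp [PySem.Int.floordiv, Int.fdiv_eq_ediv]
  rw [h2, h3]
  split_ifs with he h1
  · have : (sws / 2).toNat = sws.toNat / 2 := by omega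
    rw [this]
  · rfl
  · simp at he h1
    have : ((sws - 3) / 2).toNat = (sws.toNat - 3) / 2 := by omega
    rw [this]

-- Unfolding lemmas for A's port
lemma calcA_zero (blocks : List Int) : calc_blocksizes 0 blocks = blocks := by
  rw [calc_blocksizes]; simp

lemma calcA_even (sws : Int) (blocks : List Int) (he : sws % 2 = 0) (hp : 0 < sws) :
    calc_blocksizes sws blocks = calc_blocksizes (sws - 2) (blocks ++ [2]) := by
  rw [calc_blocksizes]
  have h0 : ¬(sws == 0) = true := by simp; omega
  simp [h0, he, hp]

lemma calcA_odd3 (sws : Int) (blocks : List Int) (he : sws % 2 ≠ 0) (h3 : 3 ≤ sws) :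
    calc_blocksizes sws blocks = calc_blocksizes (sws - 3) (blocks ++ [3]) := by
  rw [calc_blocksizes]
  have h0 : ¬(sws == 0) = true := by simp; omega
  have he' : ¬(sws % 2 == 0) = true := by simp [he]
  simp [h0, he', h3]

lemma calcA_one (blocks : List Int) : calc_blocksizes 1 blocks = blocks ++ [1] := by
  rw [calc_blocksizes]
  norm_num
  exact calcA_zero _

lemma equal_nat : ∀ (n : Nat) (blocks : List Int),
    calc_blocksizes (n : Int) blocks = calc_blocksizes_alt (n : Int) blocks := by
  intro n
  induction n using Nat.strong_induction_on with
  | _ n ih =>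
    intro blocks
    rw [alt_closed _ _ (by positivity)]
    by_cases h0 : n = 0
    · subst h0
      simp [calcA_zero]
    · by_cases he : n % 2 = 0
      · -- even, positive
        have he' : (n : Int) % 2 = 0 := by omega
        have hp : (0 : Int) < n := by omega
        rw [calcA_even _ _ he' hp]
        have hn2 : ((n : Int) - 2) = ((n - 2 : Nat) : Int) := by omega
        rw [hn2, ih _ (by omega), alt_closed _ _ (by positivity)]
        have he2 : ((n - 2 : Nat) : Int) % 2 = 0 := by omega
        simp only [he', he2, beq_self_eq_true, if_pos, Int.toNat_natCast]
        rw [List.append_assoc]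
        congr 1
        have : n / 2 = (n - 2) / 2 + 1 := by omega
        rw [this, List.replicate_succ]
        rfl
      · by_cases h1 : n = 1
        · subst h1
          rw [show ((1 : Nat) : Int) = 1 from rfl, calcA_one]
          norm_num
        · -- odd, ≥ 3
          have h3 : (3 : Int) ≤ n := by omega
          have he' : (n : Int) % 2 ≠ 0 := by omega
          rw [calcA_odd3 _ _ he' h3]
          have hn3 : ((n : Int) - 3) = ((n - 3 : Nat) : Int) := by omega
          rw [hn3, ih _ (by omega), alt_closed _ _ (by positivity)]
          have he3 : ((n - 3 : Nat) : Int) % 2 = 0 := by omega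
          have hne : ¬((n : Int) % 2 == 0) = true := by simp [he']
          have hn1 : ¬((n : Int) == 1) = true := by simp; omega
          simp only [he3, beq_self_eq_true, if_pos, Int.toNat_natCast]
          simp [hne, hn1, List.append_assoc]

-- ===== VERDICT (by name: the statement is the Claim_ definition above) =====
theorem calc_blocksizes_spec : Claim_equal_calc_blocksizes := by
  intro sws blocks _ hpre
  unfold Spec_calc_blocksizes
  have h : sws = ((sws.toNat : Nat) : Int) := by
    unfold Pre_calc_blocksizes at hpre; omega
  rw [h]
  exact equal_nat sws.toNat blocks
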